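-- pv_equiv track=rewrite | github.com/byeongjaeSon/algorithm-python | programmers/Level3/양과 늑대.py | solution
-- ===== SOURCE A (Python) =====
-- from collections import defaultdict
--
-- def solution(info, edges):
--
--     dic = defaultdict(list)
--     for edge in edges:
--         dic[edge[0]].append(edge[1])
--
--     def backtracking(curr, sheep, wolf, path):
--         if info[curr]: wolf += 1
--         else: sheep += 1
--
--         if wolf >= sheep: return 0
--
--         next_positions = []
--         for node in path:
--             next_positions.append(dic[node])
--         next_positions = sum(next_positions, [])
--
--         max_sheep = sheep
--         for next_pos in next_positions:
--             if next_pos in path: continue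
--             path.append(next_pos)
--             max_sheep = max(max_sheep, backtracking(next_pos, sheep, wolf, path))
--             path.pop()
--
--         return max_sheep
--
--     return backtracking(0, 0, 0, [0])
-- ===== SOURCE B (Python) =====
-- from collections import defaultdict
--
-- def solution(info, edges):
--     children = defaultdict(list)
--     for edge in edges:
--         children[edge[0]].append(edge[1])
--
--     memo = {}
--
--     def best(state):
--         # state: frozenset of collected nodes, known to satisfy sheep > wolves
--         if state in memo:
--             return memo[state]
--         sheep = sum(1 for v in state if not info[v])
--         wolves = len(state) - sheep
--         result = sheep
--         for v in sorted(state):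
--             for c in children[v]:
--                 if c in state:
--                     continue
--                 new_sheep = sheep if info[c] else sheep + 1
--                 new_wolves = wolves + 1 if info[c] else wolves
--                 if new_sheep > new_wolves:
--                     result = max(result, best(state | {c}))
--         memo[state] = result
--         return result
--
--     if info[0]:
--         return 0
--     return best(frozenset([0]))
-- ===== Notes on version B (the rewrite author's own statement) =====
-- stated objective: alternative
-- what changed: A backtracks over every ORDER in which nodes can be collected (a growing path list, counters threaded along it); B runs a memoized DFS keyed on the frozenset of collected nodes, evaluating each reachable valid subset once.
-- outside the precondition, e.g. on solution([0, 1], [[0, 1], [1, 5]]): A returns 1, B returns 1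
import Mathlib
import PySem

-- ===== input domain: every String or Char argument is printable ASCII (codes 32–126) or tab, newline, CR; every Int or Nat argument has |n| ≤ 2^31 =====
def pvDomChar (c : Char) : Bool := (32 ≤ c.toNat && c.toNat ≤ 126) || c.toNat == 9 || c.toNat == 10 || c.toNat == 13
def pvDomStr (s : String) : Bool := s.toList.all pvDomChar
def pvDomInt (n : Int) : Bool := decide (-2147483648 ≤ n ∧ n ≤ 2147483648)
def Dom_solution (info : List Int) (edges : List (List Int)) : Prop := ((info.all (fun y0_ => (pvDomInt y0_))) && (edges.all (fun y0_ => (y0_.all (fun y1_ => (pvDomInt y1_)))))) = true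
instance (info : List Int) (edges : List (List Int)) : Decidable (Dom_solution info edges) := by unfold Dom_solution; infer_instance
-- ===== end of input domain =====

-- B replaces A's backtracking over collection ORDERS (paths) by a memoized DFS keyed on the
-- SET of collected nodes (a frozenset), evaluating each reachable valid subset once.

-- ===== PORT A =====
-- dic = defaultdict(list); for edge in edges: dic[edge[0]].append(edge[1])
-- (a short edge raises IndexError in Python; such inputs are excluded by Pre_, the port skips them)
def buildDicA (edges : List (List Int)) : PySem.Dict Int (List Int) :=
  edges.foldl (fun d edge =>
    match PySem.List.pyGet? edge 0, PySem.List.pyGet? edge 1 with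
    | some a, some b => d.insert a (d.getD a [] ++ [b])
    | _, _ => d) PySem.Dict.empty

-- backtracking(curr, sheep, wolf, path); fuel bounds the recursion depth (path grows by one
-- distinct node per call, so depth ≤ edges.length + 2 and the 0-fuel branch is never reached
-- on inputs A terminates on); info[curr] out of range (IndexError, excluded by Pre_) reads as 0.
def btA (info : List Int) (dic : PySem.Dict Int (List Int)) :
    Nat → Int → Int → Int → List Int → Int
  | 0, _, _, _, _ => 0
  | f+1, curr, sheep, wolf, path =>
    let wolf' := if (PySem.List.pyGet? info curr).getD 0 ≠ 0 then wolf + 1 else wolf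
    let sheep' := if (PySem.List.pyGet? info curr).getD 0 ≠ 0 then sheep else sheep + 1
    if wolf' ≥ sheep' then 0
    else
      let next_positions := (path.map (fun node => dic.getD node [])).flatten
      next_positions.foldl
        (fun max_sheep next_pos =>
          if next_pos ∈ path then max_sheep
          else max max_sheep (btA info dic f next_pos sheep' wolf' (path ++ [next_pos])))
        sheep'

def solution (info : List Int) (edges : List (List Int)) : Int :=
  btA info (buildDicA edges) (edges.length + 2) 0 0 0 [0]

-- ===== PORT B =====
-- children = defaultdict(list); for edge in edges: children[edge[0]].append(edge[1])
def childrenB (edges : List (List Int)) : PySem.Dict Int (List Int) :=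
  edges.foldl (fun d edge =>
    match PySem.List.pyGet? edge 0, PySem.List.pyGet? edge 1 with
    | some a, some b => d.insert a (d.getD a [] ++ [b])
    | _, _ => d) PySem.Dict.empty

-- state | {c} on a frozenset, represented canonically as a sorted duplicate-free list
def insortB (c : Int) : List Int → List Int
  | [] => [c]
  | x :: xs => if c < x then c :: x :: xs else if c = x then x :: xs else x :: insortB c xs

-- best(state) with the memo dict threaded through; fuel as in btA (never exhausted)
def btB (info : List Int) (ch : PySem.Dict Int (List Int)) :
    Nat → List Int → PySem.Dict (List Int) Int → Int × PySem.Dict (List Int) Int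
  | 0, _, memo => (0, memo)
  | f+1, state, memo =>
    match memo.get? state with
    | some v => (v, memo)
    | none =>
      let sheep : Int := ((state.filter (fun v => (PySem.List.pyGet? info v).getD 0 = 0)).length : Int)
      let wolves : Int := (state.length : Int) - sheep
      let r :=
        state.foldl (fun (p : Int × PySem.Dict (List Int) Int) v =>
          (ch.getD v []).foldl (fun (q : Int × PySem.Dict (List Int) Int) c =>
            if c ∈ state then q
            else
              let ns := if (PySem.List.pyGet? info c).getD 0 ≠ 0 then sheep else sheep + 1
              let nw := if (PySem.List.pyGet? info c).getD 0 ≠ 0 then wolves + 1 else wolves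
              if nw < ns then
                let res := btB info ch f (insortB c state) q.2
                (max q.1 res.1, res.2)
              else q) p)
          (sheep, memo)
      (r.1, r.2.insert state r.1)

def solution_alt (info : List Int) (edges : List (List Int)) : Int :=
  if (PySem.List.pyGet? info 0).getD 0 ≠ 0 then 0
  else (btB info (childrenB edges) (edges.length + 2) [0] PySem.Dict.empty).1

-- ===== PRECONDITION & SPEC =====
-- nodes graph-reachable from node 0 along the edges (one closure round per edge suffices)
def reachStep (edges : List (List Int)) (R : List Int) : List Int :=
  edges.foldl (fun R e =>
    match PySem.List.pyGet? e 0, PySem.List.pyGet? e 1 with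
    | some a, some b => if a ∈ R ∧ b ∉ R then R ++ [b] else R
    | _, _ => R) R

def reachable (edges : List (List Int)) : List Int :=
  (List.range edges.length).foldl (fun R _ => reachStep edges R) [0]

-- Pre_ excludes the inputs where Python A raises IndexError: an edge with fewer than two
-- entries, an empty info (info[0]), or a node graph-reachable from 0 whose info index is out
-- of range (A evaluates info[c] only for nodes it visits). Reachability ignores A's
-- wolf-majority pruning, so this is slightly conservative: an out-of-range node reachable
-- only through pruned states also gets excluded (see cites).
def Pre_solution (info : List Int) (edges : List (List Int)) : Prop :=
  0 < info.length ∧ (∀ e ∈ edges, 2 ≤ e.length) ∧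
  ∀ v ∈ reachable edges, PySem.Raise.InRange info.length v
instance (info : List Int) (edges : List (List Int)) : Decidable (Pre_solution info edges) := by
  unfold Pre_solution; infer_instance

def pvWitness_solution : List Int × List (List Int) :=
  ([0, 0, 1], [[0, 1], [1, 2]])

def Spec_solution (info : List Int) (edges : List (List Int)) (out : Int) : Prop := out = solution_alt info edges
instance (info : List Int) (edges : List (List Int)) (out : Int) : Decidable (Spec_solution info edges out) := by unfold Spec_solution; infer_instance

-- ===== CLAIM (what is proved, stated in full; the proofs are below) =====
def Claim_equal_solution : Prop := ∀ (info : List Int) (edges : List (List Int)), Dom_solution info edges → Pre_solution info edges → Spec_solution info edges (solution info edges)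

-- ===== LEMMAS AND PROOFS =====

-- number of sheep in a collection S of nodes
def sheepCnt (info : List Int) (S : List Int) : Int :=
  ((S.filter (fun v => (PySem.List.pyGet? info v).getD 0 = 0)).length : Int)

-- order-free reference recursion: A's backtracking with the counters recomputed from the path
def gSpec (info : List Int) (dic : PySem.Dict Int (List Int)) : Nat → List Int → Int
  | 0, _ => 0
  | f+1, S =>
    let s := sheepCnt info S
    let w := (S.length : Int) - s
    if w ≥ s then 0
    else ((S.map (fun v => dic.getD v [])).flatten).foldl
      (fun acc c => if c ∈ S then acc else max acc (gSpec info dic f (S ++ [c]))) s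

theorem gSpec_succ (info : List Int) (dic : PySem.Dict Int (List Int)) (f : Nat) (S : List Int) :
    gSpec info dic (f+1) S =
      (if (S.length : Int) - sheepCnt info S ≥ sheepCnt info S then 0
       else ((S.map (fun v => dic.getD v [])).flatten).foldl
         (fun acc c => if c ∈ S then acc else max acc (gSpec info dic f (S ++ [c])))
         (sheepCnt info S)) := rfl

-- universe of nodes a search step can add: the edge targets
def tgts (edges : List (List Int)) : List Int :=
  edges.filterMap (fun e => PySem.List.pyGet? e 1)

-- how many universe nodes are still missing from S
def missing (V S : List Int) : Nat := (V.dedup.filter (fun v => decide (v ∉ S))).length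

theorem sheepCnt_append (info : List Int) (S : List Int) (c : Int) :
    sheepCnt info (S ++ [c]) =
      sheepCnt info S + (if (PySem.List.pyGet? info c).getD 0 = 0 then 1 else 0) := by
  simp [sheepCnt, List.filter_append]
  split_ifs with h <;> simp [h]

theorem sheepCnt_perm (info : List Int) {S S' : List Int} (h : S.Perm S') :
    sheepCnt info S = sheepCnt info S' := by
  simp [sheepCnt, (h.filter _).length_eq]

theorem gSpec_perm (info : List Int) (dic : PySem.Dict Int (List Int)) :
    ∀ (f : Nat) {S S' : List Int}, S.Perm S' → gSpec info dic f S = gSpec info dic f S' := by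
  intro f
  induction f with
  | zero => intro S S' _; rfl
  | succ f ih =>
    intro S S' h
    have hlen : S.length = S'.length := h.length_eq
    have hsh : sheepCnt info S = sheepCnt info S' := sheepCnt_perm info h
    rw [gSpec_succ, gSpec_succ, ← hlen, ← hsh]
    by_cases hv : (S.length : Int) - sheepCnt info S ≥ sheepCnt info S
    · simp [hv]
    · simp only [if_neg hv]
      have hcands : ((S.map (fun v => dic.getD v [])).flatten).Perm
          ((S'.map (fun v => dic.getD v [])).flatten) := (h.map _).flatten
      have hstep : ((S'.map (fun v => dic.getD v [])).flatten).foldl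
            (fun acc c => if c ∈ S' then acc else max acc (gSpec info dic f (S' ++ [c])))
            (sheepCnt info S) =
          ((S'.map (fun v => dic.getD v [])).flatten).foldl
            (fun acc c => if c ∈ S then acc else max acc (gSpec info dic f (S ++ [c])))
            (sheepCnt info S) := by
        refine PySem.List.foldl_congr_mem _ _ _ _ ?_
        intro acc c _
        by_cases hm : c ∈ S
        · simp [hm, h.mem_iff.mp hm]
        · have hm' : c ∉ S' := fun hx => hm (h.mem_iff.mpr hx)
          simp only [if_neg hm, if_neg hm']
          rw [ih ((List.perm_append_right_iff [c]).mpr h)]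
      rw [hstep]
      refine List.Perm.foldl_eq' hcands ?_ _
      intro x _ y _ z
      by_cases hx : x ∈ S <;> by_cases hy : y ∈ S <;>
        simp [hx, hy, max_right_comm]

theorem tgts_cons_sub (e : List Int) (es : List (List Int)) :
    ∀ c, c ∈ tgts es → c ∈ tgts (e :: es) := by
  intro c h
  unfold tgts at *
  rw [List.filterMap_cons]
  cases PySem.List.pyGet? e 1 <;> simp [h]

theorem dicA_sub_aux :
    ∀ (edges : List (List Int)) (d : PySem.Dict Int (List Int)) (k c : Int),
      c ∈ (edges.foldl (fun d edge =>
            match PySem.List.pyGet? edge 0, PySem.List.pyGet? edge 1 with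
            | some a, some b => d.insert a (d.getD a [] ++ [b])
            | _, _ => d) d).getD k [] →
      c ∈ d.getD k [] ∨ c ∈ tgts edges := by
  intro edges
  induction edges with
  | nil => intro d k c h; exact Or.inl (by simpa using h)
  | cons e es ih =>
    intro d k c h
    simp only [List.foldl_cons] at h
    rcases h0 : PySem.List.pyGet? e 0 with _ | a <;>
      rcases h1 : PySem.List.pyGet? e 1 with _ | b <;>
      simp only [h0, h1] at h
    · rcases ih d k c h with h' | h'
      · exact Or.inl h'
      · exact Or.inr (tgts_cons_sub e es c h')
    · rcases ih d k c h with h' | h'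
      · exact Or.inl h'
      · exact Or.inr (tgts_cons_sub e es c h')
    · rcases ih d k c h with h' | h'
      · exact Or.inl h'
      · exact Or.inr (tgts_cons_sub e es c h')
    · rcases ih _ k c h with h' | h'
      · rw [PySem.Dict.getD_insert] at h'
        by_cases hk : k = a
        · rw [if_pos hk] at h'
          rcases List.mem_append.mp h' with h'' | h''
          · exact Or.inl (hk ▸ h'')
          · have hcb : c = b := by simpa using h''
            refine Or.inr ?_
            unfold tgts
            rw [List.filterMap_cons, h1, hcb]
            exact List.mem_cons_self
        · rw [if_neg hk] at h'
          exact Or.inl h'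
      · exact Or.inr (tgts_cons_sub e es c h')

theorem dicA_sub (edges : List (List Int)) :
    ∀ (k c : Int), c ∈ (buildDicA edges).getD k [] → c ∈ tgts edges := by
  intro k c h
  rcases dicA_sub_aux edges PySem.Dict.empty k c h with h' | h'
  · simp [PySem.Dict.getD_empty] at h'
  · exact h'

theorem missing_le (V S : List Int) : missing V S ≤ V.dedup.length := by
  simpa [missing] using (List.filter_sublist (l := V.dedup)).length_le

theorem filter_notmem_append (S : List Int) (c : Int) (hs : c ∉ S) :
    ∀ (l : List Int), l.Nodup → c ∈ l →
      (l.filter (fun v => decide (v ∉ S ++ [c]))).length + 1 =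
      (l.filter (fun v => decide (v ∉ S))).length := by
  intro l
  induction l with
  | nil => simp
  | cons x xs ih =>
    intro hnd hmem
    rcases List.nodup_cons.mp hnd with ⟨hx, hnd'⟩
    by_cases hxc : x = c
    · subst hxc
      have hxout : ∀ v ∈ xs, (decide (v ∉ S ++ [x]) : Bool) = decide (v ∉ S) := by
        intro v hv
        have : v ≠ x := fun h => hx (h ▸ hv)
        simp [List.mem_append, this]
      have h1 : (decide (x ∉ S ++ [x]) : Bool) = false := by simp
      have h2 : (decide (x ∉ S) : Bool) = true := by simp [hs]
      simp only [List.filter_cons, h1, h2, if_false, if_true, Bool.false_eq_true]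
      rw [List.filter_congr hxout]
      simp
    · have hmem' : c ∈ xs := by
        rcases List.mem_cons.mp hmem with h | h
        · exact absurd h.symm hxc
        · exact h
      have step := ih hnd' hmem'
      by_cases hxS : x ∈ S
      · have h1 : (decide (x ∉ S ++ [c]) : Bool) = false := by simp [List.mem_append, hxS]
        have h2 : (decide (x ∉ S) : Bool) = false := by simp [hxS]
        simp only [List.filter_cons, h1, h2, Bool.false_eq_true, if_false]
        exact step
      · have h1 : (decide (x ∉ S ++ [c]) : Bool) = true := by
          simp [List.mem_append, hxS, hxc]
        have h2 : (decide (x ∉ S) : Bool) = true := by simp [hxS]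
        simp only [List.filter_cons, h1, h2, if_true, List.length_cons]
        omega
  
theorem missing_append (V S : List Int) (c : Int) (hc : c ∈ V) (hs : c ∉ S) :
    missing V (S ++ [c]) + 1 = missing V S := by
  unfold missing
  exact filter_notmem_append S c hs V.dedup V.nodup_dedup (List.mem_dedup.mpr hc)

theorem missing_pos (V S : List Int) (c : Int) (hc : c ∈ V) (hs : c ∉ S) :
    1 ≤ missing V S := by
  have : c ∈ V.dedup.filter (fun v => decide (v ∉ S)) := by
    simp [List.mem_filter, List.mem_dedup, hc, hs]
  exact le_trans (by omega) (List.length_pos_of_mem this)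

theorem gSpec_stab (info : List Int) (edges : List (List Int)) :
    ∀ (f : Nat) (S : List Int), missing (tgts edges) S < f →
      gSpec info (buildDicA edges) (f+1) S = gSpec info (buildDicA edges) f S := by
  intro f
  induction f with
  | zero => intro S h; omega
  | succ f ih =>
    intro S h
    rw [gSpec_succ, gSpec_succ]
    by_cases hv : (S.length : Int) - sheepCnt info S ≥ sheepCnt info S
    · simp [hv]
    · simp only [if_neg hv]
      refine PySem.List.foldl_congr_mem _ _ _ _ ?_
      intro acc c hc
      by_cases hm : c ∈ S
      · simp [hm]
      · simp only [if_neg hm]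
        have hct : c ∈ tgts edges := by
          rcases List.mem_flatten.mp hc with ⟨l, hl, hcl⟩
          rcases List.mem_map.mp hl with ⟨v, _, rfl⟩
          exact dicA_sub edges v c hcl
        have h1 := missing_append (tgts edges) S c hct hm
        have h2 := missing_pos (tgts edges) S c hct hm
        rw [ih (S ++ [c]) (by omega)]

theorem gSpec_chain (info : List Int) (edges : List (List Int))
    (f f' : Nat) (S : List Int) (h : missing (tgts edges) S < f) (h' : missing (tgts edges) S < f') :
    gSpec info (buildDicA edges) f S = gSpec info (buildDicA edges) f' S := by
  have aux : ∀ (k g : Nat) (T : List Int), missing (tgts edges) T < g →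
      gSpec info (buildDicA edges) (g + k) T = gSpec info (buildDicA edges) g T := by
    intro k
    induction k with
    | zero => intro g T _; rfl
    | succ k ihk =>
      intro g T hg
      have : g + (k + 1) = (g + k) + 1 := by omega
      rw [this, gSpec_stab info edges (g + k) T (by omega), ihk g T hg]
  rcases Nat.le_total f f' with hle | hle
  · rcases Nat.le.dest hle with ⟨k, rfl⟩
    exact (aux k f S h).symm
  · rcases Nat.le.dest hle with ⟨k, rfl⟩
    exact aux k f' S h'

-- canonical value of a state
def gstab (info : List Int) (edges : List (List Int)) (S : List Int) : Int :=
  gSpec info (buildDicA edges) ((tgts edges).dedup.length + 1) S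

def InvB (info : List Int) (edges : List (List Int)) (memo : PySem.Dict (List Int) Int) : Prop :=
  ∀ k v, memo.get? k = some v → v = gstab info edges k

theorem insortB_perm (c : Int) : ∀ (S : List Int), c ∉ S → (insortB c S).Perm (S ++ [c]) := by
  intro S
  induction S with
  | nil => intro _; simp [insortB]
  | cons x xs ih =>
    intro hc
    have hcx : c ≠ x := by simp [List.mem_cons] at hc; exact hc.1
    have hcxs : c ∉ xs := by simp [List.mem_cons] at hc; exact hc.2
    by_cases hlt : c < x
    · simpa [insortB, hlt] using (List.perm_append_singleton c (x :: xs)).symm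
    · simp only [insortB, if_neg hlt, if_neg hcx]
      exact ((ih hcxs).cons x)

theorem btA_succ (info : List Int) (dic : PySem.Dict Int (List Int)) (f : Nat)
    (curr s w : Int) (path : List Int) :
    btA info dic (f+1) curr s w path =
      (if (if (PySem.List.pyGet? info curr).getD 0 ≠ 0 then w + 1 else w) ≥
          (if (PySem.List.pyGet? info curr).getD 0 ≠ 0 then s else s + 1) then 0
       else ((path.map (fun node => dic.getD node [])).flatten).foldl
         (fun acc np => if np ∈ path then acc
           else max acc (btA info dic f np
             (if (PySem.List.pyGet? info curr).getD 0 ≠ 0 then s else s + 1)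
             (if (PySem.List.pyGet? info curr).getD 0 ≠ 0 then w + 1 else w)
             (path ++ [np])))
         (if (PySem.List.pyGet? info curr).getD 0 ≠ 0 then s else s + 1)) := rfl

theorem btA_eq_gSpec (info : List Int) (dic : PySem.Dict Int (List Int)) :
    ∀ (f : Nat) (pre : List Int) (curr s w : Int),
      s = sheepCnt info pre → w = (pre.length : Int) - s →
      btA info dic f curr s w (pre ++ [curr]) = gSpec info dic f (pre ++ [curr]) := by
  intro f
  induction f with
  | zero => intro pre curr s w _ _; rfl
  | succ f ih =>
    intro pre curr s w hs hw
    have hS : sheepCnt info (pre ++ [curr]) =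
        (if (PySem.List.pyGet? info curr).getD 0 ≠ 0 then s else s + 1) := by
      rw [sheepCnt_append, ← hs]
      by_cases hb : (PySem.List.pyGet? info curr).getD 0 = 0 <;> simp [hb]
    have hW : ((pre ++ [curr]).length : Int) - sheepCnt info (pre ++ [curr]) =
        (if (PySem.List.pyGet? info curr).getD 0 ≠ 0 then w + 1 else w) := by
      rw [hS]
      by_cases hb : (PySem.List.pyGet? info curr).getD 0 = 0 <;> simp [hb, hw] <;> omega
    rw [btA_succ, gSpec_succ, hW, hS]
    by_cases hv : (if (PySem.List.pyGet? info curr).getD 0 ≠ 0 then w + 1 else w) ≥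
        (if (PySem.List.pyGet? info curr).getD 0 ≠ 0 then s else s + 1)
    · simp only [if_pos hv]
    · simp only [if_neg hv]
      refine PySem.List.foldl_congr_mem _ _ _ _ ?_
      intro acc np _
      by_cases hm : np ∈ pre ++ [curr]
      · simp [hm]
      · simp only [if_neg hm]
        rw [ih (pre ++ [curr]) np _ _ hS.symm (by rw [← hS]; exact hW.symm)]

theorem sheepCnt_nonneg (info S : List Int) : 0 ≤ sheepCnt info S := by
  unfold sheepCnt; exact Int.natCast_nonneg _

theorem sheep_ext (info S : List Int) (c : Int) :
    sheepCnt info (S ++ [c]) =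
      (if (PySem.List.pyGet? info c).getD 0 ≠ 0 then sheepCnt info S else sheepCnt info S + 1) := by
  rw [sheepCnt_append]
  by_cases hb : (PySem.List.pyGet? info c).getD 0 = 0 <;> simp [hb]

theorem wolf_ext (info S : List Int) (c : Int) :
    ((S ++ [c]).length : Int) - sheepCnt info (S ++ [c]) =
      (if (PySem.List.pyGet? info c).getD 0 ≠ 0 then ((S.length : Int) - sheepCnt info S) + 1
       else (S.length : Int) - sheepCnt info S) := by
  rw [sheep_ext]
  by_cases hb : (PySem.List.pyGet? info c).getD 0 = 0 <;> simp [hb] <;> omega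

theorem missing_perm (V : List Int) {S S' : List Int} (h : S.Perm S') :
    missing V S = missing V S' := by
  unfold missing
  congr 1
  refine List.filter_congr ?_
  intro v _
  simp [h.mem_iff]

theorem childrenB_eq (edges : List (List Int)) : childrenB edges = buildDicA edges := rfl

-- the inner-loop step of btB, named for the proofs
def stepB (info : List Int) (edges : List (List Int)) (f : Nat) (state : List Int) :
    (Int × PySem.Dict (List Int) Int) → Int → (Int × PySem.Dict (List Int) Int) := fun q c =>
  if c ∈ state then q
  else
    if (if (PySem.List.pyGet? info c).getD 0 ≠ 0
          then ((state.length : Int) - sheepCnt info state) + 1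
          else (state.length : Int) - sheepCnt info state) <
       (if (PySem.List.pyGet? info c).getD 0 ≠ 0
          then sheepCnt info state else sheepCnt info state + 1) then
      (max q.1 (btB info (childrenB edges) f (insortB c state) q.2).1,
       (btB info (childrenB edges) f (insortB c state) q.2).2)
    else q

theorem btB_succ_hit (info : List Int) (ch : PySem.Dict Int (List Int)) (f : Nat)
    (state : List Int) (memo : PySem.Dict (List Int) Int) (v : Int)
    (h : memo.get? state = some v) :
    btB info ch (f+1) state memo = (v, memo) := by
  unfold btB
  rw [h]


theorem btB_succ_miss (info : List Int) (edges : List (List Int)) (f : Nat)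
    (state : List Int) (memo : PySem.Dict (List Int) Int)
    (h : memo.get? state = none) :
    btB info (childrenB edges) (f+1) state memo =
      (let r := state.foldl
          (fun p v => ((childrenB edges).getD v []).foldl (stepB info edges f state) p)
          (sheepCnt info state, memo)
       (r.1, r.2.insert state r.1)) := by
  unfold btB
  rw [h]
  rfl


theorem btB_inner (info : List Int) (edges : List (List Int)) (f : Nat) (state : List Int)
    (IH : ∀ (st : List Int) (memo : PySem.Dict (List Int) Int), InvB info edges memo →
        missing (tgts edges) st < f →
        (st.length : Int) - sheepCnt info st < sheepCnt info st →
        (btB info (childrenB edges) f st memo).1 = gstab info edges st ∧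
        InvB info edges (btB info (childrenB edges) f st memo).2)
    (hmiss : missing (tgts edges) state < f + 1) :
    ∀ (cl : List Int), (∀ c ∈ cl, c ∈ tgts edges) →
    ∀ (q : Int × PySem.Dict (List Int) Int), InvB info edges q.2 → 0 ≤ q.1 →
      (cl.foldl (stepB info edges f state) q).1 =
        cl.foldl (fun a c => if c ∈ state then a
          else max a (gstab info edges (state ++ [c]))) q.1
      ∧ InvB info edges (cl.foldl (stepB info edges f state) q).2
      ∧ 0 ≤ (cl.foldl (stepB info edges f state) q).1 := by
  intro cl
  induction cl with
  | nil => intro _ q hq hq0; exact ⟨rfl, hq, hq0⟩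
  | cons c cl ihc =>
    intro hcl q hq hq0
    have hct : c ∈ tgts edges := hcl c List.mem_cons_self
    have hcl' : ∀ x ∈ cl, x ∈ tgts edges := fun x hx => hcl x (List.mem_cons_of_mem _ hx)
    simp only [List.foldl_cons]
    by_cases hm : c ∈ state
    · have hstep : stepB info edges f state q c = q := by simp [stepB, hm]
      rw [hstep, if_pos hm]
      exact ihc hcl' q hq hq0
    · by_cases hvc :
        (if (PySem.List.pyGet? info c).getD 0 ≠ 0
            then ((state.length : Int) - sheepCnt info state) + 1
            else (state.length : Int) - sheepCnt info state) <
        (if (PySem.List.pyGet? info c).getD 0 ≠ 0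
            then sheepCnt info state else sheepCnt info state + 1)
      · -- the child state is valid: recurse and take the max
        have h1 := missing_append (tgts edges) state c hct hm
        have h2 := missing_pos (tgts edges) state c hct hm
        have hmissc : missing (tgts edges) (insortB c state) < f := by
          rw [missing_perm (tgts edges) (insortB_perm c state hm)]
          omega
        have hvalidc : ((insortB c state).length : Int) - sheepCnt info (insortB c state) <
            sheepCnt info (insortB c state) := by
          rw [sheepCnt_perm info (insortB_perm c state hm),
              (insortB_perm c state hm).length_eq, wolf_ext, sheep_ext]
          exact hvc
        obtain ⟨hr1, hr2⟩ := IH (insortB c state) q.2 hq hmissc hvalidc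
        have hgs : gstab info edges (insortB c state) = gstab info edges (state ++ [c]) :=
          gSpec_perm info (buildDicA edges) _ (insortB_perm c state hm)
        have hstep : stepB info edges f state q c =
            (max q.1 (gstab info edges (state ++ [c])),
             (btB info (childrenB edges) f (insortB c state) q.2).2) := by
          simp only [stepB, if_neg hm, if_pos hvc, hr1, hgs]
        rw [hstep, if_neg hm]
        exact ihc hcl' _ hr2 (le_trans hq0 (le_max_left _ _))
      · -- the child state is invalid: both sides skip it
        have hstep : stepB info edges f state q c = q := by
          simp only [stepB, if_neg hm, if_neg hvc]
        have hzero : gstab info edges (state ++ [c]) = 0 := by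
          unfold gstab
          rw [gSpec_succ, if_pos (by rw [wolf_ext, sheep_ext]; exact not_lt.mp hvc)]
        rw [hstep, if_neg hm, hzero, max_eq_left hq0]
        exact ihc hcl' q hq hq0

theorem btB_outer (info : List Int) (edges : List (List Int)) (f : Nat) (state : List Int)
    (IH : ∀ (st : List Int) (memo : PySem.Dict (List Int) Int), InvB info edges memo →
        missing (tgts edges) st < f →
        (st.length : Int) - sheepCnt info st < sheepCnt info st →
        (btB info (childrenB edges) f st memo).1 = gstab info edges st ∧
        InvB info edges (btB info (childrenB edges) f st memo).2)
    (hmiss : missing (tgts edges) state < f + 1) :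
    ∀ (vl : List Int) (q : Int × PySem.Dict (List Int) Int),
      InvB info edges q.2 → 0 ≤ q.1 →
      (vl.foldl (fun p v => ((childrenB edges).getD v []).foldl (stepB info edges f state) p) q).1 =
        ((vl.map (fun v => (childrenB edges).getD v [])).flatten).foldl
          (fun a c => if c ∈ state then a else max a (gstab info edges (state ++ [c]))) q.1
      ∧ InvB info edges
          (vl.foldl (fun p v => ((childrenB edges).getD v []).foldl (stepB info edges f state) p) q).2
      ∧ 0 ≤ (vl.foldl (fun p v => ((childrenB edges).getD v []).foldl (stepB info edges f state) p) q).1 := by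
  intro vl
  induction vl with
  | nil => intro q hq hq0; exact ⟨rfl, hq, hq0⟩
  | cons v vl ihv =>
    intro q hq hq0
    have hcl : ∀ c ∈ (childrenB edges).getD v [], c ∈ tgts edges := by
      intro c hc
      exact dicA_sub edges v c (by rw [← childrenB_eq]; exact hc)
    obtain ⟨hi1, hi2, hi3⟩ := btB_inner info edges f state IH hmiss _ hcl q hq hq0
    simp only [List.foldl_cons, List.map_cons, List.flatten_cons, List.foldl_append]
    rw [← hi1]
    exact ihv _ hi2 hi3

theorem btB_correct (info : List Int) (edges : List (List Int)) :
    ∀ (f : Nat) (state : List Int) (memo : PySem.Dict (List Int) Int),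
      InvB info edges memo → missing (tgts edges) state < f →
      (state.length : Int) - sheepCnt info state < sheepCnt info state →
      (btB info (childrenB edges) f state memo).1 = gstab info edges state ∧
      InvB info edges (btB info (childrenB edges) f state memo).2 := by
  intro f
  induction f with
  | zero => intro state memo _ h _; omega
  | succ f ihf =>
    intro state memo hInv hmiss hvalid
    cases hmemo : memo.get? state with
    | some v =>
      rw [btB_succ_hit info (childrenB edges) f state memo v hmemo]
      exact ⟨hInv state v hmemo, hInv⟩
    | none =>
      rw [btB_succ_miss info edges f state memo hmemo]
      obtain ⟨h1, h2, h3⟩ := btB_outer info edges f state ihf hmiss state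
        (sheepCnt info state, memo) hInv (sheepCnt_nonneg info state)
      have hg : gstab info edges state =
          ((state.map (fun v => (buildDicA edges).getD v [])).flatten).foldl
            (fun a c => if c ∈ state then a else max a (gstab info edges (state ++ [c])))
            (sheepCnt info state) := by
        unfold gstab
        rw [gSpec_succ, if_neg (not_le.mpr hvalid)]
        refine PySem.List.foldl_congr_mem _ _ _ _ ?_
        intro acc c hc
        by_cases hm : c ∈ state
        · simp [hm]
        · simp only [if_neg hm]
          have hct : c ∈ tgts edges := by
            rcases List.mem_flatten.mp hc with ⟨l, hl, hcl⟩
            rcases List.mem_map.mp hl with ⟨v, _, rfl⟩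
            exact dicA_sub edges v c hcl
          have ha := missing_append (tgts edges) state c hct hm
          have hp := missing_pos (tgts edges) state c hct hm
          have hle := missing_le (tgts edges) state
          rw [gSpec_chain info edges ((tgts edges).dedup.length)
            ((tgts edges).dedup.length + 1) (state ++ [c]) (by omega) (by omega)]
      constructor
      · show (state.foldl
          (fun p v => ((childrenB edges).getD v []).foldl (stepB info edges f state) p)
          (sheepCnt info state, memo)).1 = gstab info edges state
        rw [h1, hg, childrenB_eq]
      · intro k v hkv
        rw [PySem.Dict.get?_insert] at hkv
        by_cases hk : k = state
        · rw [if_pos hk] at hkv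
          cases hkv
          rw [hk]
          show (state.foldl
            (fun p v => ((childrenB edges).getD v []).foldl (stepB info edges f state) p)
            (sheepCnt info state, memo)).1 = gstab info edges state
          rw [h1, hg, childrenB_eq]
        · rw [if_neg hk] at hkv
          exact h2 k v hkv

-- ===== VERDICT (by name: the statement is the Claim_ definition above) =====
theorem solution_spec : Claim_equal_solution := by
  intro info edges hdom hpre
  unfold Spec_solution solution solution_alt
  have hA : btA info (buildDicA edges) (edges.length + 2) 0 0 0 [0] =
      gSpec info (buildDicA edges) (edges.length + 2) [0] := by
    have h := btA_eq_gSpec info (buildDicA edges) (edges.length + 2) [] 0 0 0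
      (by simp [sheepCnt]) (by simp)
    simpa using h
  have hKle : (tgts edges).dedup.length ≤ edges.length :=
    le_trans (List.Sublist.length_le (List.dedup_sublist _))
      (by simpa [tgts] using List.length_filterMap_le (fun e => PySem.List.pyGet? e 1) edges)
  have hm0 : missing (tgts edges) [0] ≤ (tgts edges).dedup.length := missing_le _ _
  have hchain : gSpec info (buildDicA edges) (edges.length + 2) [0] = gstab info edges [0] :=
    gSpec_chain info edges _ _ [0] (by omega) (by omega)
  by_cases hc : (PySem.List.pyGet? info 0).getD 0 ≠ 0
  · rw [if_pos hc, hA, hchain]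
    have h0 : sheepCnt info [0] = 0 := by simp [sheepCnt, hc]
    unfold gstab
    rw [gSpec_succ, h0, if_pos (by norm_num)]
  · rw [if_neg hc, hA, hchain]
    have hc' : (PySem.List.pyGet? info 0).getD 0 = 0 := not_ne_iff.mp hc
    have h1 : sheepCnt info [0] = 1 := by simp [sheepCnt, hc']
    have hvalid : (([0] : List Int).length : Int) - sheepCnt info [0] < sheepCnt info [0] := by
      rw [h1]; norm_num
    have hInv : InvB info edges PySem.Dict.empty := by
      intro k v h; simp [PySem.Dict.get?_empty] at h
    obtain ⟨hb1, _⟩ := btB_correct info edges (edges.length + 2) [0] PySem.Dict.empty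
      hInv (by omega) hvalid
    exact hb1.symm
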